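-- pv_equiv track=rewrite | github.com/joecomerisnotavailable/phoneme_based_language_id | train.py | count_bigram
-- ===== SOURCE A (Python) =====
-- def count_bigram(bigram, string):
--     """Count bigram occurences in a string.
--
--     This will actually also count unigrams.
--     """
--     count = start = 0
--     while True:
--         start = string.find(bigram, start) + 1
--         if start > 0:
--             count += 1
--         else:
--             return count
-- ===== SOURCE B (Python) =====
-- def count_bigram(bigram, string):
--     """Count bigram occurences in a string.
--
--     This will actually also count unigrams.
--     """
--     m = len(bigram)
--     return sum(string[i:i + m] == bigram for i in range(len(string) - m + 1))
-- ===== Notes on version B (the rewrite author's own statement) =====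
-- stated objective: simpler
-- what changed: Replaced A's stateful while-loop that jumps between successive string.find hits by a single comprehension counting every valid start index i in range(len(string)-len(bigram)+1) where string[i:i+len(bigram)] equals the bigram.
import Mathlib
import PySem

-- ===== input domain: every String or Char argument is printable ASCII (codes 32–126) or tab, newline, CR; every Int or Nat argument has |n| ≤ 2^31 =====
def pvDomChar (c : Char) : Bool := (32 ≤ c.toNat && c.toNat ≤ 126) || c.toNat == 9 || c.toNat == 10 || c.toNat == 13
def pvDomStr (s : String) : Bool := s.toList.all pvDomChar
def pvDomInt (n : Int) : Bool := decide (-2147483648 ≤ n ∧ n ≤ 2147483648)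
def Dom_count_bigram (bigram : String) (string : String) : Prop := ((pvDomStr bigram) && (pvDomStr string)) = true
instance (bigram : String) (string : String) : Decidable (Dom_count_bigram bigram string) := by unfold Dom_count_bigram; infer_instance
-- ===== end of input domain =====

-- B replaces A's find-and-jump while-loop by one direct pass over the valid start
-- indices, counting positions where the slice equals the bigram (objective: simpler).

-- ===== PORT A =====
-- the 'while True' loop of A: start = string.find(bigram, start) + 1; count += 1 or return.
-- fuel is only a totality guard: each iteration strictly increases start (which stays in
-- [0, len+1]), so len(string) + 2 iterations always suffice; the fuel-exhausted branch is
-- never reached (pv_go_eq below never uses it).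
def countBigramGo (b s : List Char) (fuel : Nat) (count : Int) (start : Int) : Int :=
  match fuel with
  | 0 => count
  | fuel + 1 =>
    let f := PySem.Chars.findFrom s b start none
    if 0 ≤ f then
      countBigramGo b s fuel (count + 1) (f + 1)
    else
      count

def count_bigram (bigram : String) (string : String) : Int :=
  countBigramGo bigram.toList string.toList (string.toList.length + 2) 0 0

-- ===== PORT B =====
-- m = len(bigram); sum(string[i:i+m] == bigram for i in range(len(string) - m + 1))
def count_bigram_alt (bigram : String) (string : String) : Int :=
  let b := bigram.toList
  let s := string.toList
  let m : Int := b.length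
  (PySem.List.pyRange 0 ((s.length : Int) - m + 1) 1).foldl
    (fun acc i => acc + (if PySem.List.slice s (some i) (some (i + m)) = b then 1 else 0)) 0

-- ===== PRECONDITION & SPEC =====
def Spec_count_bigram (bigram : String) (string : String) (out : Int) : Prop := out = count_bigram_alt bigram string
instance (bigram : String) (string : String) (out : Int) : Decidable (Spec_count_bigram bigram string out) := by unfold Spec_count_bigram; infer_instance

-- ===== CLAIM (what is proved, stated in full; the proofs are below) =====
def Claim_equal_count_bigram : Prop := ∀ (bigram : String) (string : String), Dom_count_bigram bigram string → Spec_count_bigram bigram string (count_bigram bigram string)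

-- ===== LEMMAS AND PROOFS =====

-- bounds on findFrom used by the loop invariant
theorem pv_findFrom_pastLen (s b : List Char) (k : Nat) (h : s.length < k) :
    PySem.Chars.findFrom s b (k : Int) none = -1 := by
  simp [PySem.Chars.findFrom]
  intro h1; omega

theorem pv_findFrom_bounds (s b : List Char) (k : Nat) (hk : k ≤ s.length)
    (h : 0 ≤ PySem.Chars.findFrom s b (k : Int) none) :
    (k : Int) ≤ PySem.Chars.findFrom s b (k : Int) none ∧
      PySem.Chars.findFrom s b (k : Int) none ≤ s.length := by
  rw [PySem.Chars.findFrom_natCast s b k hk] at *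
  split at h
  · omega
  · have := PySem.Chars.find_le_length (s.drop k) b
    have := PySem.Chars.neg_one_le_find (s.drop k) b
    simp at this ⊢
    constructor <;> [omega; (simp [List.length_drop] at *; omega)]

-- number of positions j in [start, s.length] at which b occurs as a prefix of s.drop j
def pvCnt (b s : List Char) (start : Nat) : Int :=
  ((List.range' start (s.length + 1 - start)).countP (fun j => decide (b <+: s.drop j)) : Nat)

theorem pv_prefix_drop_infix (b s : List Char) (start j : Nat) (hj : start ≤ j)
    (h : b <+: s.drop j) : b <:+: s.drop start := by
  have : s.drop j = (s.drop start).drop (j - start) := by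
    rw [List.drop_drop]; congr 1; omega
  rw [this] at h
  exact h.isInfix.trans (List.drop_suffix _ _).isInfix

theorem pv_cnt_zero (b s : List Char) (start : Nat) (_hs : start ≤ s.length)
    (hno : ¬ b <:+: s.drop start) : pvCnt b s start = 0 := by
  unfold pvCnt
  norm_num [List.countP_eq_zero]
  intro j hj1 hj2
  exact fun hpre => hno (pv_prefix_drop_infix b s start j hj1 hpre)

theorem pv_cnt_split (b s : List Char) (start f : Nat) (h1 : start ≤ f) (h2 : f ≤ s.length)
    (hocc : b <+: s.drop f) (hmin : ∀ i, start ≤ i → i < f → ¬ b <+: s.drop i) :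
    pvCnt b s start = 1 + pvCnt b s (f + 1) := by
  unfold pvCnt
  have hsplit : List.range' start (s.length + 1 - start) =
      List.range' start (f - start) ++ List.range' f (s.length + 1 - f) := by
    have h3 : s.length + 1 - start = (f - start) + (s.length + 1 - f) := by omega
    rw [h3, ← List.range'_append]
    congr 2
    omega
  rw [hsplit, List.countP_append]
  have hz : (List.range' start (f - start)).countP (fun j => decide (b <+: s.drop j)) = 0 := by
    rw [List.countP_eq_zero]
    intro j hj
    have hj' := List.mem_range'_1.mp hj
    simpa using hmin j hj'.1 (by omega)
  have hcons : List.range' f (s.length + 1 - f) = f :: List.range' (f + 1) (s.length - f) := by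
    have : s.length + 1 - f = (s.length - f) + 1 := by omega
    rw [this, List.range'_succ]
  rw [hz, hcons, List.countP_cons]
  have : s.length + 1 - (f + 1) = s.length - f := by omega
  simp [hocc, this]
  ring

theorem pv_go_eq (b s : List Char) : ∀ (fuel : Nat) (c : Int) (start : Nat),
    start ≤ s.length + 1 → s.length + 1 - start < fuel →
    countBigramGo b s fuel c (start : Int) = c + pvCnt b s start := by
  intro fuel
  induction fuel with
  | zero => intro c start _ hf; omega
  | succ fuel ih =>
    intro c start hs hf
    rw [countBigramGo]
    by_cases h : 0 ≤ PySem.Chars.findFrom s b (start : Int) none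
    · simp only [h, if_true]
      by_cases hlen : start ≤ s.length
      · have hb := pv_findFrom_bounds s b start hlen h
        have hne : PySem.Chars.findFrom s b (start : Int) none ≠ -1 := by omega
        have hspec := PySem.Chars.findFrom_natCast_spec s b start hlen hne
        set f := PySem.Chars.findFrom s b (start : Int) none with hfdef
        have hfl : f.toNat ≤ s.length := by omega
        have hfs : start ≤ f.toNat := by omega
        have hcast : f + 1 = ((f.toNat + 1 : Nat) : Int) := by omega
        rw [hcast, ih (c + 1) (f.toNat + 1) (by omega) (by omega)]
        rw [pv_cnt_split b s start f.toNat hfs hfl hspec.2.1 hspec.2.2]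
        ring
      · exfalso
        rw [pv_findFrom_pastLen s b start (by omega)] at h
        omega
    · simp only [h, if_false]
      by_cases hlen : start ≤ s.length
      · rw [PySem.Chars.findFrom_natCast s b start hlen] at h
        have hno : ¬ b <:+: s.drop start := by
          split at h
          · next heq => exact (PySem.Chars.find_eq_neg_one_iff _ _).mp heq
          · next hne =>
            exfalso
            have := PySem.Chars.neg_one_le_find (s.drop start) b
            omega
        rw [pv_cnt_zero b s start hlen hno]
        ring
      · have : start = s.length + 1 := by omega
        unfold pvCnt
        rw [this]
        simp

theorem pv_foldl_count {α : Type} (p : α → Prop) [DecidablePred p] (l : List α) (c : Int) :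
    l.foldl (fun acc x => acc + (if p x then 1 else 0)) c = c + (l.countP (fun x => decide (p x)) : Nat) := by
  induction l generalizing c with
  | nil => simp
  | cons x xs ih =>
    simp only [List.foldl_cons, List.countP_cons, ih]
    by_cases hx : p x
    · simp only [hx, if_true, decide_true]
      push_cast
      ring
    · simp [hx]

-- a long bigram cannot be a prefix of a short suffix
theorem pv_no_prefix_of_long (b s : List Char) (j : Nat) (hb0 : 0 < b.length)
    (h : s.length < j + b.length) : ¬ b <+: s.drop j := by
  intro hp
  have := hp.length_le
  simp [List.length_drop] at this
  omega

theorem pv_alt_eq (bigram string : String) :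
    count_bigram_alt bigram string = pvCnt bigram.toList string.toList 0 := by
  show (PySem.List.pyRange 0 ((string.toList.length : Int) - (bigram.toList.length : Int) + 1) 1).foldl
      (fun acc i => acc + (if PySem.List.slice string.toList (some i)
          (some (i + (bigram.toList.length : Int))) = bigram.toList then 1 else 0)) 0
    = pvCnt bigram.toList string.toList 0
  set b := bigram.toList with hb
  set s := string.toList with hs
  by_cases hm : b.length ≤ s.length + 1
  · -- valid-range case: the bound equals the Nat s.length + 1 - b.length
    have hcast : ((s.length : Int) - (b.length : Int) + 1) = ((s.length + 1 - b.length : Nat) : Int) := by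
      omega
    rw [hcast, PySem.List.pyRange_zero_natCast, List.foldl_map]
    simp only [PySem.List.slice_natCast_add]
    have hcond : ∀ k : Nat, ((s.drop k).take b.length = b) ↔ (b <+: s.drop k) := by
      intro k
      rw [List.prefix_iff_eq_take]
      exact eq_comm
    simp only [hcond]
    rw [pv_foldl_count (fun k => b <+: s.drop k)]
    unfold pvCnt
    rw [List.range_eq_range']
    -- extend the count from range' 0 (len+1-m) to range' 0 (len+1): the tail counts 0
    have hsplit : List.range' 0 (s.length + 1 - b.length) ++
          List.range' (s.length + 1 - b.length) b.length = List.range' 0 (s.length + 1) := by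
      have h := @List.range'_append 0 (s.length + 1 - b.length) b.length 1
      simp only [Nat.zero_add, Nat.one_mul] at h
      rw [h]
      congr 1
      omega
    have hz : (List.range' (s.length + 1 - b.length) b.length).countP
        (fun j => decide (b <+: s.drop j)) = 0 := by
      rw [List.countP_eq_zero]
      intro j hj
      have hj' := List.mem_range'_1.mp hj
      simpa using pv_no_prefix_of_long b s j (by omega) (by omega)
    simp only [Nat.sub_zero]
    rw [← hsplit, List.countP_append, hz]
    simp
  · -- bigram longer than string + 1: empty range on the left, no occurrence on the right
    rw [PySem.List.pyRange_one_eq_nil (by omega)]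
    have : pvCnt b s 0 = 0 := by
      unfold pvCnt
      rw [List.countP_eq_zero.mpr]
      · simp
      · intro j hj
        have hj' := List.mem_range'_1.mp hj
        simpa using pv_no_prefix_of_long b s j (by omega) (by omega)
    rw [this]
    rfl

-- ===== VERDICT (by name: the statement is the Claim_ definition above) =====
theorem count_bigram_spec : Claim_equal_count_bigram := by
  intro bigram string _
  unfold Spec_count_bigram count_bigram
  have h := pv_go_eq bigram.toList string.toList (string.toList.length + 2) 0 0 (by omega) (by omega)
  simp only [Nat.cast_zero, zero_add] at h
  rw [h, pv_alt_eq]
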